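-- pv_equiv track=rewrite | github.com/valusun/Algorithm | Search/深さ優先探索/再帰/009_Asc_Number.py | func
-- ===== SOURCE A (Python) =====
-- def func(n,l,r):
--     if l>r:
--         return []
--     if n==0:
--         return [""]
--     ans = []
--     for x in func(n-1,l,r):
--         ans.append(str(l)+x)
--     for x in func(n,l+1,r):
--         ans.append(x)
--     return ans
-- ===== SOURCE B (Python) =====
-- def func(n, l, r):
--     if l > r:
--         return []
--     seqs = [("", l)]
--     for _ in range(n):
--         seqs = [(s + str(d), d) for (s, lo) in seqs for d in range(lo, r + 1)]
--     return [s for (s, _) in seqs]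
-- ===== Notes on version B (the rewrite author's own statement) =====
-- stated objective: simpler
-- what changed: Replaces A's two-way recursion (prefix-extend then shift the lower bound) with a single iterative loop that extends every prefix by all admissible next digits n times.
import Mathlib
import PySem

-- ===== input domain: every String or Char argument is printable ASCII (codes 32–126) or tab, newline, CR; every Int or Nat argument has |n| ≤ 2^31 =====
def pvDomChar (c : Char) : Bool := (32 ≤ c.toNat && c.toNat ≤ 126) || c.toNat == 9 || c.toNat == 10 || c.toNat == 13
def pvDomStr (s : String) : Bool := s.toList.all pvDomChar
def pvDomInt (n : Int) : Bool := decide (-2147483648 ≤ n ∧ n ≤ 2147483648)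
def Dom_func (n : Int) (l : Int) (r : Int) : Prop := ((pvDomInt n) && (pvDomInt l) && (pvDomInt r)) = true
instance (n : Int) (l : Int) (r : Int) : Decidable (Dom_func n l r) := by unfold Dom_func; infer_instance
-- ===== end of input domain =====

-- B replaces A's two-branch recursion with a single iterative loop that extends all
-- prefixes digit-by-digit (objective: simpler/iterative; same output, same order).

-- ===== PORT A =====
-- A's recursion diverges for n < 0 with l ≤ r (Python RecursionError), so the port
-- carries an explicit fuel that is sufficient on Pre_func; it is not a second algorithm.
def funcGo : Nat → Int → Int → Int → List String
  | 0, _, _, _ => []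
  | fuel + 1, n, l, r =>
    if l > r then []
    else if n = 0 then [""]
    else (funcGo fuel (n - 1) l r).map (fun x => PySem.Int.toStr l ++ x)
           ++ funcGo fuel n (l + 1) r

def func (n : Int) (l : Int) (r : Int) : List String :=
  funcGo (n.toNat + (r + 1 - l).toNat + 1) n l r

-- ===== PORT B =====
-- one extension step: (s, lo) ↦ [(s + str(d), d) for d in range(lo, r+1)]
def funcStep (r : Int) (seqs : List (String × Int)) : List (String × Int) :=
  seqs.flatMap (fun p =>
    (PySem.List.pyRange p.2 (r + 1) 1).map (fun d => (p.1 ++ PySem.Int.toStr d, d)))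

def func_alt (n : Int) (l : Int) (r : Int) : List String :=
  if l > r then []
  else
    (((PySem.List.pyRange 0 n 1).foldl (fun seqs _ => funcStep r seqs) [("", l)]).map
      Prod.fst)

-- ===== PRECONDITION & SPEC =====
-- Pre_ excludes n < 0 with l ≤ r, where A's recursion never terminates (RecursionError).
def Pre_func (n : Int) (l : Int) (r : Int) : Prop := 0 ≤ n ∨ l > r
instance (n : Int) (l : Int) (r : Int) : Decidable (Pre_func n l r) := by
  unfold Pre_func; infer_instance

def pvWitness_func : Int × Int × Int := (2, 1, 3)

def Spec_func (n : Int) (l : Int) (r : Int) (out : List String) : Prop := out = func_alt n l r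
instance (n : Int) (l : Int) (r : Int) (out : List String) : Decidable (Spec_func n l r out) := by unfold Spec_func; infer_instance

-- ===== CLAIM (what is proved, stated in full; the proofs are below) =====
def Claim_equal_func : Prop := ∀ (n : Int) (l : Int) (r : Int), Dom_func n l r → Pre_func n l r → Spec_func n l r (func n l r)

-- ===== LEMMAS AND PROOFS =====

-- reference function: A's recursion on a Nat length (terminating by (k, r+1-l))
def gRef : Nat → Int → Int → List String
  | k, l, r =>
    if _h : l > r then []
    else
      match k with
      | 0 => [""]
      | k + 1 =>
        (gRef k l r).map (fun x => PySem.Int.toStr l ++ x) ++ gRef (k + 1) (l + 1) r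
termination_by k l r => (k, (r + 1 - l).toNat)
decreasing_by
  · exact Prod.Lex.left _ _ (Nat.lt_succ_self k)
  · exact Prod.Lex.right _ (by omega)

theorem funcGo_eq_gRef (fuel : Nat) : ∀ (n l r : Int), 0 ≤ n →
    n.toNat + (r + 1 - l).toNat < fuel → funcGo fuel n l r = gRef n.toNat l r := by
  induction fuel with
  | zero => intro n l r _ h; omega
  | succ fuel ih =>
    intro n l r hn hlt
    rw [funcGo, gRef.eq_def]
    by_cases hlr : l > r
    · simp [hlr]
    · simp only [if_neg hlr, dif_neg hlr]
      by_cases h0 : n = 0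
      · subst h0; simp
      · have hna : n.toNat = (n - 1).toNat + 1 := by omega
        rw [if_neg h0, hna]
        rw [ih (n - 1) l r (by omega) (by omega),
            ih n (l + 1) r hn (by omega), hna]

theorem func_eq_gRef (n l r : Int) (hn : 0 ≤ n) : func n l r = gRef n.toNat l r := by
  exact funcGo_eq_gRef _ n l r hn (by omega)

-- B-side: the loop body ignores the range element, so the foldl is an iterate
theorem foldl_ignore {α β : Type} (f : α → α) (xs : List β) (s : α) :
    xs.foldl (fun a _ => f a) s = f^[xs.length] s := by
  induction xs generalizing s with
  | nil => rfl
  | cons x xs ih => simp [List.foldl_cons, ih, Function.iterate_succ_apply]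

theorem funcStep_nil (r : Int) : funcStep r [] = [] := rfl

theorem funcStep_append (r : Int) (xs ys : List (String × Int)) :
    funcStep r (xs ++ ys) = funcStep r xs ++ funcStep r ys := by
  simp [funcStep]

theorem iterate_funcStep_nil (r : Int) (k : Nat) : (funcStep r)^[k] [] = [] := by
  induction k with
  | zero => rfl
  | succ k ih => rw [Function.iterate_succ_apply, funcStep_nil, ih]

theorem iterate_funcStep_append (r : Int) (k : Nat) (xs ys : List (String × Int)) :
    (funcStep r)^[k] (xs ++ ys) = (funcStep r)^[k] xs ++ (funcStep r)^[k] ys := by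
  induction k generalizing xs ys with
  | zero => rfl
  | succ k ih =>
    rw [Function.iterate_succ_apply, Function.iterate_succ_apply,
        Function.iterate_succ_apply, funcStep_append, ih]

theorem iterate_funcStep_flatMap (r : Int) (k : Nat) (xs : List (String × Int)) :
    (funcStep r)^[k] xs = xs.flatMap (fun p => (funcStep r)^[k] [p]) := by
  induction xs with
  | nil => simp [iterate_funcStep_nil]
  | cons p xs ih =>
    have : p :: xs = [p] ++ xs := rfl
    rw [this, iterate_funcStep_append, ih]
    simp

theorem flatMap_congr_mem {α β : Type} (xs : List α) (f g : α → List β)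
    (h : ∀ x ∈ xs, f x = g x) : xs.flatMap f = xs.flatMap g := by
  induction xs with
  | nil => rfl
  | cons x xs ih =>
    simp only [List.flatMap_cons]
    rw [h x (by simp), ih (fun y hy => h y (by simp [hy]))]

-- prepending a common prefix commutes with iterating the extension step
theorem iterate_funcStep_shift (r : Int) (k : Nat) :
    ∀ (s : String) (lo : Int),
      (funcStep r)^[k] [(s, lo)] =
        ((funcStep r)^[k] [("", lo)]).map (fun q => (s ++ q.1, q.2)) := by
  induction k with
  | zero => intro s lo; simp [String.append_empty]
  | succ k ih =>
    intro s lo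
    rw [Function.iterate_succ_apply, Function.iterate_succ_apply]
    have hstep : ∀ t : String, funcStep r [(t, lo)] =
        (PySem.List.pyRange lo (r + 1) 1).map
          (fun d => (t ++ PySem.Int.toStr d, d)) := by
      intro t; simp [funcStep]
    rw [hstep s, hstep ""]
    rw [iterate_funcStep_flatMap r k, iterate_funcStep_flatMap r k
        ((PySem.List.pyRange lo (r + 1) 1).map (fun d => ("" ++ PySem.Int.toStr d, d)))]
    rw [List.flatMap_map, List.flatMap_map, List.map_flatMap]
    apply flatMap_congr_mem
    intro d _
    rw [ih (s ++ PySem.Int.toStr d) d, ih ("" ++ PySem.Int.toStr d) d]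
    simp only [List.map_map]
    apply List.map_congr_left
    intro q _
    simp [String.empty_append, String.append_assoc]

-- A's recursion as a flatMap over the first digit
theorem gRef_flatMap (k : Nat) (r : Int) (lo : Int) :
    gRef (k + 1) lo r =
      (PySem.List.pyRange lo (r + 1) 1).flatMap
        (fun d => (gRef k d r).map (fun x => PySem.Int.toStr d ++ x)) := by
  by_cases h : lo > r
  · rw [gRef.eq_def]
    simp [h, PySem.List.pyRange_one_eq_nil (by omega : r + 1 ≤ lo)]
  · rw [gRef.eq_def]
    simp only [dif_neg h]
    rw [PySem.List.pyRange_one_cons (by omega : lo < r + 1), List.flatMap_cons,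
        gRef_flatMap k r (lo + 1)]
termination_by (r + 1 - lo).toNat
decreasing_by omega

theorem iterate_funcStep_fst (r : Int) (k : Nat) :
    ∀ lo : Int, lo ≤ r →
      ((funcStep r)^[k] [("", lo)]).map Prod.fst = gRef k lo r := by
  induction k with
  | zero =>
    intro lo hlo
    rw [gRef.eq_def]
    simp [not_lt.mpr hlo, Function.iterate_zero_apply]
  | succ k ih =>
    intro lo hlo
    rw [Function.iterate_succ_apply]
    have hstep : funcStep r [("", lo)] =
        (PySem.List.pyRange lo (r + 1) 1).map
          (fun d => (PySem.Int.toStr d, d)) := by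
      simp [funcStep, String.empty_append]
    rw [hstep, iterate_funcStep_flatMap, List.flatMap_map, List.map_flatMap,
        gRef_flatMap k r lo]
    apply flatMap_congr_mem
    intro d hd
    have hdr : d ≤ r := by
      have := (PySem.List.mem_pyRange_one.mp hd).2; omega
    rw [iterate_funcStep_shift r k (PySem.Int.toStr d) d, List.map_map,
        ← ih d hdr, List.map_map]
    rfl

theorem funcAlt_eq_gRef (n l r : Int) (hn : 0 ≤ n) :
    func_alt n l r = gRef n.toNat l r := by
  unfold func_alt
  by_cases hlr : l > r
  · rw [if_pos hlr, gRef.eq_def]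
    cases h : n.toNat <;> simp [hlr]
  · rw [if_neg hlr, foldl_ignore, PySem.List.length_pyRange_one]
    have : (n - 0).toNat = n.toNat := by omega
    rw [this, iterate_funcStep_fst r n.toNat l (by omega)]

-- ===== VERDICT (by name: the statement is the Claim_ definition above) =====
theorem func_spec : Claim_equal_func := by
  intro n l r _ hpre
  unfold Spec_func
  rcases hpre with hn | hlr
  · rw [func_eq_gRef n l r hn, funcAlt_eq_gRef n l r hn]
  · simp [func, func_alt, funcGo, hlr]
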